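-- pv_equiv track=rewrite | github.com/haskele/sims-engine | backend/services/daily_pipeline.py | _name_matches_abbr
-- ===== SOURCE A (Python) =====
-- from typing import Any, Dict, List, Optional, Tuple
--
-- _TEAM_NAME_TO_ABBR: Dict[str, str] = {
--     "arizona diamondbacks": "ARI", "diamondbacks": "ARI", "d-backs": "ARI",
--     "atlanta braves": "ATL", "braves": "ATL",
--     "baltimore orioles": "BAL", "orioles": "BAL",
--     "boston red sox": "BOS", "red sox": "BOS",
--     "chicago cubs": "CHC", "cubs": "CHC",
--     "chicago white sox": "CWS", "white sox": "CWS",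
--     "cincinnati reds": "CIN", "reds": "CIN",
--     "cleveland guardians": "CLE", "guardians": "CLE",
--     "colorado rockies": "COL", "rockies": "COL",
--     "detroit tigers": "DET", "tigers": "DET",
--     "houston astros": "HOU", "astros": "HOU",
--     "kansas city royals": "KC", "royals": "KC",
--     "los angeles angels": "LAA", "angels": "LAA",
--     "los angeles dodgers": "LAD", "dodgers": "LAD",
--     "miami marlins": "MIA", "marlins": "MIA",
--     "milwaukee brewers": "MIL", "brewers": "MIL",
--     "minnesota twins": "MIN", "twins": "MIN",
--     "new york mets": "NYM", "mets": "NYM",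
--     "new york yankees": "NYY", "yankees": "NYY",
--     "oakland athletics": "OAK", "athletics": "OAK", "a's": "OAK",
--     "philadelphia phillies": "PHI", "phillies": "PHI",
--     "pittsburgh pirates": "PIT", "pirates": "PIT",
--     "san diego padres": "SD", "padres": "SD",
--     "san francisco giants": "SF", "giants": "SF",
--     "seattle mariners": "SEA", "mariners": "SEA",
--     "st. louis cardinals": "STL", "cardinals": "STL",
--     "tampa bay rays": "TB", "rays": "TB",
--     "texas rangers": "TEX", "rangers": "TEX",
--     "toronto blue jays": "TOR", "blue jays": "TOR",
--     "washington nationals": "WSH", "nationals": "WSH",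
-- }
--
-- def _name_matches_abbr(team_name: str, abbr: str) -> bool:
--     """Check if a team full name matches an abbreviation."""
--     name_lower = team_name.lower()
--     resolved = _TEAM_NAME_TO_ABBR.get(name_lower)
--     if resolved and resolved == abbr:
--         return True
--     # Also check if any partial match
--     for full_name, ab in _TEAM_NAME_TO_ABBR.items():
--         if ab == abbr and (full_name in name_lower or name_lower in full_name):
--             return True
--     return False
-- ===== SOURCE B (Python) =====
-- # B: a hand-maintained reverse index abbr -> full names; the function does one
-- # index lookup and scans only the few candidate names for that abbreviation
-- # (the exact-lookup shortcut is redundant: an exact key match passes the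
-- # substring test). Objective: simpler.
-- from typing import Dict, List
--
-- _ABBR_TO_NAMES: Dict[str, List[str]] = {
--     "ARI": ["arizona diamondbacks", "diamondbacks", "d-backs"],
--     "ATL": ["atlanta braves", "braves"],
--     "BAL": ["baltimore orioles", "orioles"],
--     "BOS": ["boston red sox", "red sox"],
--     "CHC": ["chicago cubs", "cubs"],
--     "CWS": ["chicago white sox", "white sox"],
--     "CIN": ["cincinnati reds", "reds"],
--     "CLE": ["cleveland guardians", "guardians"],
--     "COL": ["colorado rockies", "rockies"],
--     "DET": ["detroit tigers", "tigers"],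
--     "HOU": ["houston astros", "astros"],
--     "KC": ["kansas city royals", "royals"],
--     "LAA": ["los angeles angels", "angels"],
--     "LAD": ["los angeles dodgers", "dodgers"],
--     "MIA": ["miami marlins", "marlins"],
--     "MIL": ["milwaukee brewers", "brewers"],
--     "MIN": ["minnesota twins", "twins"],
--     "NYM": ["new york mets", "mets"],
--     "NYY": ["new york yankees", "yankees"],
--     "OAK": ["oakland athletics", "athletics", "a's"],
--     "PHI": ["philadelphia phillies", "phillies"],
--     "PIT": ["pittsburgh pirates", "pirates"],
--     "SD": ["san diego padres", "padres"],
--     "SF": ["san francisco giants", "giants"],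
--     "SEA": ["seattle mariners", "mariners"],
--     "STL": ["st. louis cardinals", "cardinals"],
--     "TB": ["tampa bay rays", "rays"],
--     "TEX": ["texas rangers", "rangers"],
--     "TOR": ["toronto blue jays", "blue jays"],
--     "WSH": ["washington nationals", "nationals"],}
--
--
-- def _name_matches_abbr(team_name: str, abbr: str) -> bool:
--     """Check if a team full name matches an abbreviation."""
--     name_lower = team_name.lower()
--     for full_name in _ABBR_TO_NAMES.get(abbr, []):
--         if full_name in name_lower or name_lower in full_name:
--             return True
--     return False
-- ===== Notes on version B (the rewrite author's own statement) =====
-- stated objective: simpler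
-- what changed: B keeps a reverse index abbreviation -> list of full names and the function does one index lookup then scans only the few candidate names for that abbreviation (dropping A's redundant exact-lookup shortcut), instead of A's exact lookup plus a scan of the whole name->abbr dict with an inner abbreviation filter.
import Mathlib
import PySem

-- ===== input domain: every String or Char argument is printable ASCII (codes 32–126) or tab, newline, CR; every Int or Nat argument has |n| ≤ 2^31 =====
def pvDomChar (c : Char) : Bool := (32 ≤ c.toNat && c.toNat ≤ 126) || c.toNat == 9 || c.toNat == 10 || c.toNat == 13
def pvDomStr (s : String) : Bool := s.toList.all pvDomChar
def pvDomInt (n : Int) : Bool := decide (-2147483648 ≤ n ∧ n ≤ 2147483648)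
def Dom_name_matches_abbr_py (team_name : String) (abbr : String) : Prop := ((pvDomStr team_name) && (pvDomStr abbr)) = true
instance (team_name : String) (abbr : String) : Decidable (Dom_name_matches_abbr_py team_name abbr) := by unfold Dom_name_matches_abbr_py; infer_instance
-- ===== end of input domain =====

-- B replaces A's whole-dict scan (with an inner abbreviation filter) by a reverse
-- index abbr -> candidate full names: one lookup, then a scan of only the few
-- candidates; objective: simpler.

-- ===== PORT A =====
-- the module-level dict _TEAM_NAME_TO_ABBR (insertion order; keys are distinct)
def teamDict : PySem.Dict String String := PySem.Dict.ofList [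
  ("arizona diamondbacks", "ARI"), ("diamondbacks", "ARI"), ("d-backs", "ARI"),
  ("atlanta braves", "ATL"), ("braves", "ATL"),
  ("baltimore orioles", "BAL"), ("orioles", "BAL"),
  ("boston red sox", "BOS"), ("red sox", "BOS"),
  ("chicago cubs", "CHC"), ("cubs", "CHC"),
  ("chicago white sox", "CWS"), ("white sox", "CWS"),
  ("cincinnati reds", "CIN"), ("reds", "CIN"),
  ("cleveland guardians", "CLE"), ("guardians", "CLE"),
  ("colorado rockies", "COL"), ("rockies", "COL"),
  ("detroit tigers", "DET"), ("tigers", "DET"),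
  ("houston astros", "HOU"), ("astros", "HOU"),
  ("kansas city royals", "KC"), ("royals", "KC"),
  ("los angeles angels", "LAA"), ("angels", "LAA"),
  ("los angeles dodgers", "LAD"), ("dodgers", "LAD"),
  ("miami marlins", "MIA"), ("marlins", "MIA"),
  ("milwaukee brewers", "MIL"), ("brewers", "MIL"),
  ("minnesota twins", "MIN"), ("twins", "MIN"),
  ("new york mets", "NYM"), ("mets", "NYM"),
  ("new york yankees", "NYY"), ("yankees", "NYY"),
  ("oakland athletics", "OAK"), ("athletics", "OAK"), ("a's", "OAK"),
  ("philadelphia phillies", "PHI"), ("phillies", "PHI"),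
  ("pittsburgh pirates", "PIT"), ("pirates", "PIT"),
  ("san diego padres", "SD"), ("padres", "SD"),
  ("san francisco giants", "SF"), ("giants", "SF"),
  ("seattle mariners", "SEA"), ("mariners", "SEA"),
  ("st. louis cardinals", "STL"), ("cardinals", "STL"),
  ("tampa bay rays", "TB"), ("rays", "TB"),
  ("texas rangers", "TEX"), ("rangers", "TEX"),
  ("toronto blue jays", "TOR"), ("blue jays", "TOR"),
  ("washington nationals", "WSH"), ("nationals", "WSH")]

def name_matches_abbr_py (team_name : String) (abbr : String) : Bool :=
  let name_lower := PySem.Str.lower team_name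
  let resolved := teamDict.get? name_lower
  -- 'if resolved and resolved == abbr': None and "" are falsy
  if (match resolved with
      | some r => (!(r == "")) && r == abbr
      | none => false) then
    true
  else
    -- 'for full_name, ab in _TEAM_NAME_TO_ABBR.items(): if …: return True' / 'return False'
    teamDict.items.any (fun p =>
      p.2 == abbr && (PySem.Str.isIn p.1 name_lower || PySem.Str.isIn name_lower p.1))

-- ===== PORT B =====
-- Source B's module-level literal _ABBR_TO_NAMES: abbr -> list of full names
def abbrNames : PySem.Dict String (List String) := PySem.Dict.ofList [
  ("ARI", ["arizona diamondbacks", "diamondbacks", "d-backs"]),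
  ("ATL", ["atlanta braves", "braves"]),
  ("BAL", ["baltimore orioles", "orioles"]),
  ("BOS", ["boston red sox", "red sox"]),
  ("CHC", ["chicago cubs", "cubs"]),
  ("CWS", ["chicago white sox", "white sox"]),
  ("CIN", ["cincinnati reds", "reds"]),
  ("CLE", ["cleveland guardians", "guardians"]),
  ("COL", ["colorado rockies", "rockies"]),
  ("DET", ["detroit tigers", "tigers"]),
  ("HOU", ["houston astros", "astros"]),
  ("KC", ["kansas city royals", "royals"]),
  ("LAA", ["los angeles angels", "angels"]),
  ("LAD", ["los angeles dodgers", "dodgers"]),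
  ("MIA", ["miami marlins", "marlins"]),
  ("MIL", ["milwaukee brewers", "brewers"]),
  ("MIN", ["minnesota twins", "twins"]),
  ("NYM", ["new york mets", "mets"]),
  ("NYY", ["new york yankees", "yankees"]),
  ("OAK", ["oakland athletics", "athletics", "a's"]),
  ("PHI", ["philadelphia phillies", "phillies"]),
  ("PIT", ["pittsburgh pirates", "pirates"]),
  ("SD", ["san diego padres", "padres"]),
  ("SF", ["san francisco giants", "giants"]),
  ("SEA", ["seattle mariners", "mariners"]),
  ("STL", ["st. louis cardinals", "cardinals"]),
  ("TB", ["tampa bay rays", "rays"]),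
  ("TEX", ["texas rangers", "rangers"]),
  ("TOR", ["toronto blue jays", "blue jays"]),
  ("WSH", ["washington nationals", "nationals"])]

-- 'for full_name in _ABBR_TO_NAMES.get(abbr, []): if …: return True' / 'return False'
def name_matches_abbr_py_alt (team_name : String) (abbr : String) : Bool :=
  let name_lower := PySem.Str.lower team_name
  (abbrNames.getD abbr []).any (fun full_name =>
    PySem.Str.isIn full_name name_lower || PySem.Str.isIn name_lower full_name)

-- ===== PRECONDITION & SPEC =====
def Spec_name_matches_abbr_py (team_name : String) (abbr : String) (out : Bool) : Prop := out = name_matches_abbr_py_alt team_name abbr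
instance (team_name : String) (abbr : String) (out : Bool) : Decidable (Spec_name_matches_abbr_py team_name abbr out) := by unfold Spec_name_matches_abbr_py; infer_instance

-- ===== CLAIM (what is proved, stated in full; the proofs are below) =====
def Claim_equal_name_matches_abbr_py : Prop := ∀ (team_name : String) (abbr : String), Dom_name_matches_abbr_py team_name abbr → Spec_name_matches_abbr_py team_name abbr (name_matches_abbr_py team_name abbr)

-- ===== LEMMAS AND PROOFS =====

-- grouping teamDict's entries by their abbreviation: looking up k in the grouped
-- index yields the first components of the entries whose second component is k, in order
theorem getD_buildRev (l : List (String × String)) (d : PySem.Dict String (List String)) (k : String) :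
    (l.foldl (fun d p => d.insert p.2 (d.getD p.2 [] ++ [p.1])) d).getD k []
      = d.getD k [] ++ (l.filter (fun p => p.2 == k)).map Prod.fst := by
  induction l generalizing d with
  | nil => simp
  | cons p rest ih =>
    simp only [List.foldl_cons, ih, List.filter_cons]
    by_cases h : p.2 = k
    · subst h
      simp [pysem]
    · simp [pysem, h, Ne.symm h]

-- B's hand-written index is exactly teamDict grouped by abbreviation
set_option maxRecDepth 10000 in
theorem abbrNames_eq_buildRev :
    abbrNames = teamDict.items.foldl
      (fun d p => d.insert p.2 (d.getD p.2 [] ++ [p.1])) PySem.Dict.empty := by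
  decide

theorem getD_abbrNames (k : String) :
    abbrNames.getD k []
      = (teamDict.items.filter (fun p => p.2 == k)).map Prod.fst := by
  rw [abbrNames_eq_buildRev, getD_buildRev]
  simp

-- first-match lookup hits a stored pair
theorem mem_items_of_get? (d : PySem.Dict String String) (k v : String)
    (h : d.get? k = some v) : (k, v) ∈ d.items := by
  obtain ⟨l⟩ := d
  induction l with
  | nil => simp [PySem.Dict.get?] at h
  | cons p rest ih =>
    rw [PySem.Dict.get?_mk_cons] at h
    by_cases hk : p.1 == k
    · have h1 : p.1 = k := by simpa using hk
      have h2 : p.2 = v := by simpa [hk] using h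
      rw [← h1, ← h2]
      simp
    · simp only [hk, Bool.false_eq_true, if_false] at h
      exact List.mem_cons_of_mem _ (ih h)

theorem alt_eq_any (team_name abbr : String) :
    name_matches_abbr_py_alt team_name abbr
      = teamDict.items.any (fun p =>
          p.2 == abbr && (PySem.Str.isIn p.1 (PySem.Str.lower team_name)
            || PySem.Str.isIn (PySem.Str.lower team_name) p.1)) := by
  unfold name_matches_abbr_py_alt
  rw [getD_abbrNames, List.any_map, List.any_filter]
  rfl

-- if the exact lookup fires, the partial-match scan also finds that entry
theorem shortcut_imp_any (team_name abbr : String) (r : String)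
    (hget : teamDict.get? (PySem.Str.lower team_name) = some r) (hr : r = abbr) :
    teamDict.items.any (fun p =>
      p.2 == abbr && (PySem.Str.isIn p.1 (PySem.Str.lower team_name)
        || PySem.Str.isIn (PySem.Str.lower team_name) p.1)) = true := by
  rw [List.any_eq_true]
  refine ⟨(PySem.Str.lower team_name, r), mem_items_of_get? _ _ _ hget, ?_⟩
  simp [hr, PySem.Chars.isIn_iff_infix]

-- ===== VERDICT (by name: the statement is the Claim_ definition above) =====
theorem name_matches_abbr_py_spec : Claim_equal_name_matches_abbr_py := by
  intro team_name abbr _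
  unfold Spec_name_matches_abbr_py
  rw [alt_eq_any]
  rcases hg : teamDict.get? (PySem.Str.lower team_name) with _ | r
  · simp [name_matches_abbr_py, hg]
  · simp only [name_matches_abbr_py, hg]
    split_ifs with hc
    · have hr : r = abbr := by
        simp only [Bool.and_eq_true, beq_iff_eq] at hc
        exact hc.2
      exact (shortcut_imp_any team_name abbr r hg hr).symm
    · rfl
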